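-- pv_equiv track=rewrite | github.com/gbcolborne/ner_eval | eval/eval_utils.py | get_bio2_mention_offsets
-- ===== SOURCE A (Python) =====
-- def get_bio2_mention_offsets(labels):
--     """ Given a list of BIO-2 labels, find mention boundaries, return
--     start offsets and end offsets of the mentions. """
--     offsets = []
--     prefixes = [x[0] for x in labels]
--     # Pad labels with an extra O at the end to avoid going out of
--     # bounds when we look for the end offset of the mentons we find
--     prefixes.append("O")
--     i = 0
--     while i < len(labels):
--         prefix = prefixes[i]
--         if prefix == "B":
--             end = i
--             while prefixes[end+1][0] == "I":
--                 end += 1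
--             offsets.append((i, end))
--             i = end + 1
--         else:
--             i += 1
--     return offsets
-- ===== SOURCE B (Python) =====
-- def get_bio2_mention_offsets(labels):
--     """ Given a list of BIO-2 labels, find mention boundaries, return
--     start offsets and end offsets of the mentions. """
--     prefixes = [x[0] for x in labels]
--     offsets = []
--     start = None
--     for i, p in enumerate(prefixes):
--         if p == "B":
--             if start is not None:
--                 offsets.append((start, i - 1))
--             start = i
--         elif p != "I":
--             if start is not None:
--                 offsets.append((start, i - 1))
--             start = None
--     if start is not None:
--         offsets.append((start, len(labels) - 1))
--     return offsets
-- ===== Notes on version B (the rewrite author's own statement) =====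
-- stated objective: simpler
-- what changed: Replaces A's index-jumping outer while-loop with a nested inner scan for each mention end by a single flat state-machine pass over the label prefixes that carries the pending mention start and closes it on 'B', on a non-'I' prefix, or at the end.
import Mathlib
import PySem

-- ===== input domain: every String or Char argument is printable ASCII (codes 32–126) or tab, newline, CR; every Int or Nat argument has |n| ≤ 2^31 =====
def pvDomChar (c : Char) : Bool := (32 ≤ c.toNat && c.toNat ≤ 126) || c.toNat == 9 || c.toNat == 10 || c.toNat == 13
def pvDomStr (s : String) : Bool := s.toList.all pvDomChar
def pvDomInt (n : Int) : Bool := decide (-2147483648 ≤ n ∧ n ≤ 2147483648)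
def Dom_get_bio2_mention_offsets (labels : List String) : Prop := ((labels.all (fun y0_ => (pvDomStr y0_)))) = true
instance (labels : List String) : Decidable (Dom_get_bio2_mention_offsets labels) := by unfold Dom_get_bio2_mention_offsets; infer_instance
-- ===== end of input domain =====

-- B replaces A's index-jumping outer while with nested end-scan by a single flat
-- state-machine pass keeping the pending mention start (objective: simpler).


-- ===== PORT A =====
-- inner while: `end = i; while prefixes[end+1][0] == "I": end += 1`
-- (each element of `prefixes` is modelled as Option Char = first char of the label,
--  none exactly where Python's x[0] raises IndexError; those inputs are outside Pre_)
def pvScanEndA (prefixes : List (Option Char)) (e : Nat) : Nat :=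
  if h : prefixes[e+1]?.getD none = some 'I' then pvScanEndA prefixes (e+1) else e
termination_by prefixes.length - e
decreasing_by
  by_cases hl : e + 1 < prefixes.length
  · omega
  · exfalso; rw [List.getElem?_eq_none (by omega)] at h; simp at h

-- needed by pvLoopA's termination proof
theorem pvScanEndA_ge (prefixes : List (Option Char)) (e : Nat) : e ≤ pvScanEndA prefixes e := by
  fun_induction pvScanEndA prefixes e with
  | case1 e h ih => omega
  | case2 e h => omega

-- outer while: `i = 0; while i < len(labels): ...`
def pvLoopA (n : Nat) (prefixes : List (Option Char)) (i : Nat) (offsets : List (Int × Int)) :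
    List (Int × Int) :=
  if h : i < n then
    if prefixes[i]?.getD none = some 'B' then
      let e := pvScanEndA prefixes i
      pvLoopA n prefixes (e+1) (offsets ++ [((i : Int), (e : Int))])
    else
      pvLoopA n prefixes (i+1) offsets
  else offsets
termination_by n - i
decreasing_by
  · have := pvScanEndA_ge prefixes i; omega
  · omega

def get_bio2_mention_offsets (labels : List String) : List (Int × Int) :=
  -- prefixes = [x[0] for x in labels]; prefixes.append("O")
  let prefixes := (labels.map (fun x => PySem.Str.pyGet? x 0)) ++ [some 'O']
  pvLoopA labels.length prefixes 0 []

-- ===== PORT B =====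
-- loop body of B's single pass: state = (offsets, start)
def pvStepB (acc : List (Int × Int) × Option Int) (ip : Int × Option Char) :
    List (Int × Int) × Option Int :=
  if ip.2 = some 'B' then
    ((match acc.2 with | some s => acc.1 ++ [(s, ip.1 - 1)] | none => acc.1), some ip.1)
  else if ip.2 ≠ some 'I' then
    ((match acc.2 with | some s => acc.1 ++ [(s, ip.1 - 1)] | none => acc.1), none)
  else acc

def get_bio2_mention_offsets_alt (labels : List String) : List (Int × Int) :=
  let prefixes := labels.map (fun x => PySem.Str.pyGet? x 0)
  let st := (PySem.List.enumerate prefixes 0).foldl pvStepB ([], none)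
  match st.2 with
  | some s => st.1 ++ [(s, (labels.length : Int) - 1)]
  | none => st.1

-- ===== PRECONDITION & SPEC =====
-- Pre_ excludes exactly the inputs on which Python A raises IndexError:
-- a list containing an empty-string label (x[0] fails in the comprehension).
def Pre_get_bio2_mention_offsets (labels : List String) : Prop :=
  ∀ s ∈ labels, s ≠ ""
instance (labels : List String) : Decidable (Pre_get_bio2_mention_offsets labels) := by
  unfold Pre_get_bio2_mention_offsets; infer_instance
def pvWitness_get_bio2_mention_offsets : List String := ["B-PER", "I-PER", "O", "B-LOC"]

def Spec_get_bio2_mention_offsets (labels : List String) (out : List (Int × Int)) : Prop := out = get_bio2_mention_offsets_alt labels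
instance (labels : List String) (out : List (Int × Int)) : Decidable (Spec_get_bio2_mention_offsets labels out) := by unfold Spec_get_bio2_mention_offsets; infer_instance

-- ===== CLAIM (what is proved, stated in full; the proofs are below) =====
def Claim_equal_get_bio2_mention_offsets : Prop := ∀ (labels : List String), Dom_get_bio2_mention_offsets labels → Pre_get_bio2_mention_offsets labels → Spec_get_bio2_mention_offsets labels (get_bio2_mention_offsets labels)

-- ===== LEMMAS AND PROOFS =====

-- number of leading `some 'I'` entries
def pvCountI : List (Option Char) → Nat
  | [] => 0
  | p :: rest => if p = some 'I' then pvCountI rest + 1 else 0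

theorem pvCountI_le_length (l : List (Option Char)) : pvCountI l ≤ l.length := by
  induction l with
  | nil => simp [pvCountI]
  | cons p rest ih => simp only [pvCountI, List.length_cons]; split <;> omega

-- common reference: the mention list, computed structurally
def pvMentions (i : Nat) : List (Option Char) → List (Int × Int)
  | [] => []
  | p :: rest =>
    if p = some 'B' then
      ((i : Int), (i : Int) + (pvCountI rest : Int)) ::
        pvMentions (i + pvCountI rest + 1) (rest.drop (pvCountI rest))
    else
      pvMentions (i + 1) rest
termination_by l => l.length
decreasing_by
  · simp
  · simp

theorem pvScanEndA_eq (prefixes : List (Option Char)) :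
    ∀ (k i : Nat), prefixes.length - i ≤ k → i ≤ prefixes.length →
      pvScanEndA (prefixes ++ [some 'O']) i = i + pvCountI (prefixes.drop (i+1)) := by
  intro k
  induction k with
  | zero =>
    intro i hk hi
    have hi' : i = prefixes.length := by omega
    subst hi'
    rw [pvScanEndA]
    rw [List.getElem?_eq_none (by simp)]
    simp [List.drop_eq_nil_of_le (by omega : prefixes.length ≤ prefixes.length + 1), pvCountI]
  | succ k ih =>
    intro i hk hi
    rcases Nat.lt_or_ge i prefixes.length with hlt | hge
    · rw [pvScanEndA]
      rcases Nat.lt_or_ge (i+1) prefixes.length with h1 | h1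
      · have hget : (prefixes ++ [some 'O'])[i+1]? = some prefixes[i+1] := by
          rw [List.getElem?_append_left h1]; simp [h1]
        have hdrop : prefixes.drop (i+1) = prefixes[i+1] :: prefixes.drop (i+2) := by
          rw [List.drop_eq_getElem_cons h1]
        by_cases hI : prefixes[i+1] = some 'I'
        · rw [dif_pos (by simp [hget, hI])]
          rw [ih (i+1) (by omega) (by omega)]
          rw [hdrop]
          simp only [pvCountI, if_pos hI]
          have h2 : i + 1 + 1 = i + 2 := by omega
          rw [h2]
          omega
        · rw [dif_neg (by simp [hget, hI])]
          rw [hdrop]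
          simp [pvCountI, hI]
      · have hi1 : i + 1 = prefixes.length := by omega
        have hget : (prefixes ++ [some 'O'])[i+1]? = some (some 'O') := by
          rw [hi1, List.getElem?_append_right (by omega)]; simp
        rw [dif_neg (by simp [hget])]
        simp [List.drop_eq_nil_of_le (by omega : prefixes.length ≤ i + 1), pvCountI]
    · have hi' : i = prefixes.length := by omega
      subst hi'
      rw [pvScanEndA]
      rw [List.getElem?_eq_none (by simp)]
      simp [List.drop_eq_nil_of_le (by omega : prefixes.length ≤ prefixes.length + 1), pvCountI]

theorem pvLoopA_eq (prefixes : List (Option Char)) :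
    ∀ (k i : Nat) (offsets : List (Int × Int)), prefixes.length - i ≤ k → i ≤ prefixes.length →
      pvLoopA prefixes.length (prefixes ++ [some 'O']) i offsets
        = offsets ++ pvMentions i (prefixes.drop i) := by
  intro k
  induction k with
  | zero =>
    intro i offsets hk hi
    have hi' : i = prefixes.length := by omega
    subst hi'
    rw [pvLoopA]
    simp [List.drop_eq_nil_of_le (le_refl _), pvMentions]
  | succ k ih =>
    intro i offsets hk hi
    rcases Nat.lt_or_ge i prefixes.length with hlt | hge
    · rw [pvLoopA, dif_pos hlt]
      have hget : (prefixes ++ [some 'O'])[i]? = some prefixes[i] := by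
        rw [List.getElem?_append_left hlt]; simp [hlt]
      have hdrop : prefixes.drop i = prefixes[i] :: prefixes.drop (i+1) := by
        rw [List.drop_eq_getElem_cons hlt]
      by_cases hB : prefixes[i] = some 'B'
      · rw [if_pos (by simp [hget, hB])]
        have hscan := pvScanEndA_eq prefixes (prefixes.length - i) i (by omega) (by omega)
        set kI := pvCountI (prefixes.drop (i+1)) with hkI
        have hkIle : kI ≤ prefixes.length - (i+1) := by
          have := pvCountI_le_length (prefixes.drop (i+1))
          simpa using this
        simp only [hscan]
        rw [ih (i + kI + 1) (offsets ++ [((i:Int), ((i + kI : Nat) : Int))]) (by omega) (by omega)]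
        rw [hdrop]
        rw [pvMentions, if_pos hB]
        have hdd : (prefixes.drop (i+1)).drop kI = prefixes.drop (i + kI + 1) := by
          rw [List.drop_drop]; ring_nf
        rw [← hkI, hdd]
        rw [List.append_assoc]
        simp only [List.singleton_append]
        push_cast
        rfl
      · rw [if_neg (by simp [hget, hB])]
        rw [ih (i+1) offsets (by omega) (by omega)]
        rw [hdrop, pvMentions, if_neg hB]
    · have hi' : i = prefixes.length := by omega
      subst hi'
      rw [pvLoopA]
      simp [List.drop_eq_nil_of_le (le_refl _), pvMentions]

-- B's trailing `if start is not None: offsets.append(...)`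
def pvFinishB (n : Nat) (st : List (Int × Int) × Option Int) : List (Int × Int) :=
  match st.2 with
  | some s => st.1 ++ [(s, (n : Int) - 1)]
  | none => st.1

theorem pvFoldB_eq (n : Nat) (l : List (Option Char)) :
    (∀ (i : Nat) (offsets : List (Int × Int)), i + l.length = n →
        pvFinishB n (List.foldl pvStepB (offsets, none) (PySem.List.enumerate l (i : Int)))
          = offsets ++ pvMentions i l)
    ∧ (∀ (i : Nat) (offsets : List (Int × Int)) (s : Int), i + l.length = n →
        pvFinishB n (List.foldl pvStepB (offsets, some s) (PySem.List.enumerate l (i : Int)))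
          = offsets ++ [(s, (i : Int) + (pvCountI l : Int) - 1)]
              ++ pvMentions (i + pvCountI l) (l.drop (pvCountI l))) := by
  induction l with
  | nil =>
    constructor
    · intro i offsets hn
      simp [PySem.List.enumerate_nil, pvFinishB, pvMentions]
    · intro i offsets s hn
      simp only [List.length_nil, Nat.add_zero] at hn
      subst hn
      simp [PySem.List.enumerate_nil, pvFinishB, pvCountI, pvMentions]
  | cons p rest ih =>
    have hcast : ∀ i : Nat, (i : Int) + 1 = ((i + 1 : Nat) : Int) := by intro i; push_cast; ring
    constructor
    · intro i offsets hn
      rw [PySem.List.enumerate_cons]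
      simp only [List.foldl_cons]
      by_cases hB : p = some 'B'
      · have hstep : pvStepB (offsets, none) ((i : Int), p) = (offsets, some (i : Int)) := by
          simp [pvStepB, hB]
        rw [hstep, hcast i, ih.2 (i+1) offsets (i : Int) (by simp at hn ⊢; omega)]
        rw [pvMentions, if_pos hB]
        have hidx : i + 1 + pvCountI rest = i + pvCountI rest + 1 := by omega
        rw [hidx]
        push_cast
        ring_nf
        simp
      · by_cases hI : p = some 'I'
        · have hstep : pvStepB (offsets, none) ((i : Int), p) = (offsets, none) := by
            simp [pvStepB, hI]
          rw [hstep, hcast i, ih.1 (i+1) offsets (by simp at hn ⊢; omega)]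
          rw [pvMentions, if_neg hB]
        · have hstep : pvStepB (offsets, none) ((i : Int), p) = (offsets, none) := by
            simp [pvStepB, hB, hI]
          rw [hstep, hcast i, ih.1 (i+1) offsets (by simp at hn ⊢; omega)]
          rw [pvMentions, if_neg hB]
    · intro i offsets s hn
      rw [PySem.List.enumerate_cons]
      simp only [List.foldl_cons]
      by_cases hB : p = some 'B'
      · have hstep : pvStepB (offsets, some s) ((i : Int), p)
            = (offsets ++ [(s, (i : Int) - 1)], some (i : Int)) := by
          simp [pvStepB, hB]
        rw [hstep, hcast i, ih.2 (i+1) _ (i : Int) (by simp at hn ⊢; omega)]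
        have hc0 : pvCountI (p :: rest) = 0 := by simp [pvCountI, hB]
        rw [hc0]
        simp only [List.drop_zero]
        rw [pvMentions, if_pos hB]
        have hidx : i + 1 + pvCountI rest = i + pvCountI rest + 1 := by omega
        rw [hidx]
        push_cast
        ring_nf
        simp
      · by_cases hI : p = some 'I'
        · have hstep : pvStepB (offsets, some s) ((i : Int), p) = (offsets, some s) := by
            simp [pvStepB, hI]
          rw [hstep, hcast i, ih.2 (i+1) offsets s (by simp at hn ⊢; omega)]
          have hc : pvCountI (p :: rest) = pvCountI rest + 1 := by simp [pvCountI, hI]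
          rw [hc]
          simp only [List.drop_succ_cons]
          congr 2
          · push_cast; ring_nf
          · omega
        · have hstep : pvStepB (offsets, some s) ((i : Int), p)
              = (offsets ++ [(s, (i : Int) - 1)], none) := by
            simp [pvStepB, hB, hI]
          rw [hstep, hcast i, ih.1 (i+1) _ (by simp at hn ⊢; omega)]
          have hc0 : pvCountI (p :: rest) = 0 := by simp [pvCountI]; intro h; simp [h] at hI
          rw [hc0]
          simp only [List.drop_zero]
          rw [pvMentions, if_neg hB]
          simp

-- ===== VERDICT (by name: the statement is the Claim_ definition above) =====
theorem get_bio2_mention_offsets_spec : Claim_equal_get_bio2_mention_offsets := by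
  intro labels _ _
  unfold Spec_get_bio2_mention_offsets
  unfold get_bio2_mention_offsets get_bio2_mention_offsets_alt
  set prefixes := labels.map (fun x => PySem.Str.pyGet? x 0) with hpre
  have hlen : labels.length = prefixes.length := by simp [hpre]
  have hA := pvLoopA_eq prefixes prefixes.length 0 [] (by omega) (by omega)
  have hB := (pvFoldB_eq prefixes.length prefixes).1 0 [] (by omega)
  simp only [hlen]
  rw [hA]
  simp only [List.drop_zero, List.nil_append]
  simp only [Nat.cast_zero, List.nil_append] at hB
  rw [← hB]
  simp [pvFinishB]
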